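-- pv_equiv track=rewrite | github.com/TencentBlueKing/bk-user | src/saas/bkuser_shell/organization/utils.py | get_options_values_by_key
-- ===== SOURCE A (Python) =====
-- def get_options_values_by_key(options: list, keys: list):
--     if not options:
--         return None
--
--     values = []
--     for k in keys:
--         for pair in options:
--             if pair[0] == k:
--                 values.append(pair[1])
--
--     return values
-- ===== SOURCE B (Python) =====
-- def get_options_values_by_key(options: list, keys: list):
--     if not options:
--         return None
--
--     index = {}
--     for k, v in options:
--         index.setdefault(k, []).append(v)
--
--     values = []
--     for k in keys:
--         values.extend(index.get(k, []))
--     return values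
-- ===== Notes on version B (the rewrite author's own statement) =====
-- stated objective: faster
-- what changed: Replaces the nested scan (for each key, rescan the whole options list) by a single pass building a dict key->list of values, then one lookup per key.
import Mathlib
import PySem

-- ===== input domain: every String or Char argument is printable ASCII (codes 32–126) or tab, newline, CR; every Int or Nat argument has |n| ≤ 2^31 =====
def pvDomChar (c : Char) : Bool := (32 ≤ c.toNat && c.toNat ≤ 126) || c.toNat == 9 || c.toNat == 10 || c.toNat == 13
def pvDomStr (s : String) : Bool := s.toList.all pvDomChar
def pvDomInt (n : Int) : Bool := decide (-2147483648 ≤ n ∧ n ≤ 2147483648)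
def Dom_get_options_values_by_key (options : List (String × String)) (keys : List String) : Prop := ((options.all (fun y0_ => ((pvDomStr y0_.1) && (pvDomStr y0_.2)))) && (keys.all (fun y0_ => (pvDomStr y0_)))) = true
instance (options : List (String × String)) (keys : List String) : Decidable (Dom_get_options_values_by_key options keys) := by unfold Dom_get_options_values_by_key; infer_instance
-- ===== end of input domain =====

-- B replaces A's nested rescans by a dict key → list of values built in one pass (objective: faster).

-- ===== PORT A =====
-- literal port: for k in keys: for pair in options: if pair[0] == k: values.append(pair[1])
def get_options_values_by_key (options : List (String × String)) (keys : List String) : Option (List String) :=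
  if options = [] then none
  else
    some (keys.foldl (fun values k =>
      options.foldl (fun values pair =>
        if pair.1 == k then values ++ [pair.2] else values) values) [])

-- ===== PORT B =====
-- literal port of Source B: index[k] built by setdefault(k, []).append(v) = modify k [] (· ++ [v])
def get_options_values_by_key_alt (options : List (String × String)) (keys : List String) : Option (List String) :=
  if options = [] then none
  else
    let index : PySem.Dict String (List String) :=
      options.foldl (fun d p => d.modify p.1 [] (· ++ [p.2])) PySem.Dict.empty
    some (keys.foldl (fun values k => values ++ index.getD k []) [])

-- ===== PRECONDITION & SPEC =====
def Spec_get_options_values_by_key (options : List (String × String)) (keys : List String) (out : Option (List String)) : Prop := out = get_options_values_by_key_alt options keys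
instance (options : List (String × String)) (keys : List String) (out : Option (List String)) : Decidable (Spec_get_options_values_by_key options keys out) := by unfold Spec_get_options_values_by_key; infer_instance

-- ===== CLAIM (what is proved, stated in full; the proofs are below) =====
def Claim_equal_get_options_values_by_key : Prop := ∀ (options : List (String × String)) (keys : List String), Dom_get_options_values_by_key options keys → Spec_get_options_values_by_key options keys (get_options_values_by_key options keys)

-- ===== LEMMAS AND PROOFS =====

-- A's inner scan over options for one key collects exactly the values whose key matches.
theorem innerA_eq (options : List (String × String)) (k : String) (acc : List String) :
    options.foldl (fun values pair => if pair.1 == k then values ++ [pair.2] else values) acc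
    = acc ++ (options.filter (fun p => p.1 == k)).map (·.2) := by
  induction options generalizing acc with
  | nil => simp
  | cons p rest ih =>
    by_cases h : p.1 == k
    · rw [List.foldl_cons, if_pos h, ih]
      simp only [List.filter_cons, h, if_true, List.map_cons, List.append_assoc,
        List.singleton_append]
    · rw [List.foldl_cons, if_neg h, ih]
      simp [h]

-- both outer loops fold the same per-key list onto the accumulator
theorem outer_congr (keys : List String) (f g : List String → String → List String)
    (h : ∀ values k, f values k = g values k) (acc : List String) :
    keys.foldl f acc = keys.foldl g acc := by
  induction keys generalizing acc with
  | nil => rfl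
  | cons k rest ih => simp only [List.foldl_cons, h, ih]

-- ===== VERDICT (by name: the statement is the Claim_ definition above) =====
theorem get_options_values_by_key_spec : Claim_equal_get_options_values_by_key := by
  intro options keys _
  unfold Spec_get_options_values_by_key get_options_values_by_key get_options_values_by_key_alt
  by_cases h : options = []
  · simp [h]
  · simp only [h, if_false]
    refine congrArg some ?_
    refine Eq.trans (outer_congr keys _
        (fun values k => values ++ (options.filter (fun p => p.1 == k)).map (·.2)) ?_ []) ?_
    · intro values k
      exact innerA_eq options k values
    · refine (outer_congr keys _ _ ?_ []).symm
      intro values k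
      rw [PySem.Dict.getD_foldl_modify_append options PySem.Dict.empty k]
      simp [PySem.Dict.getD_empty]
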